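-- pv_equiv track=rewrite | github.com/X-R3Y24/CTF-solves | Crypto/BSidesSF-CTF-2026/Dodecacrypt/key_recovery.py | compatible
-- ===== SOURCE A (Python) =====
-- def compatible(c1, c2):
--     """Check if two constraint dicts can coexist in a single key."""
--     pos_to_letter = {}
--     letter_to_pos = {}
--     for c in [c1, c2]:
--         for pos, letter in c.items():
--             if pos in pos_to_letter and pos_to_letter[pos] != letter:
--                 return False
--             if letter in letter_to_pos and letter_to_pos[letter] != pos:
--                 return False
--             pos_to_letter[pos] = letter
--             letter_to_pos[letter] = pos
--     return True
-- ===== SOURCE B (Python) =====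
-- def compatible(c1, c2):
--     """Check if two constraint dicts can coexist in a single key."""
--     merged = {}
--     for c in (c1, c2):
--         for pos, letter in c.items():
--             if merged.get(pos, letter) != letter:
--                 return False
--             merged[pos] = letter
--     return len(set(merged.values())) == len(merged)
-- ===== Notes on version B (the rewrite author's own statement) =====
-- stated objective: simpler
-- what changed: B drops A's reverse letter-to-pos map and its inline reverse-conflict check: it builds only the merged pos-to-letter dict (failing fast on positional disagreement) and checks injectivity once at the end by comparing len(set(values)) with len(merged).
import Mathlib
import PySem

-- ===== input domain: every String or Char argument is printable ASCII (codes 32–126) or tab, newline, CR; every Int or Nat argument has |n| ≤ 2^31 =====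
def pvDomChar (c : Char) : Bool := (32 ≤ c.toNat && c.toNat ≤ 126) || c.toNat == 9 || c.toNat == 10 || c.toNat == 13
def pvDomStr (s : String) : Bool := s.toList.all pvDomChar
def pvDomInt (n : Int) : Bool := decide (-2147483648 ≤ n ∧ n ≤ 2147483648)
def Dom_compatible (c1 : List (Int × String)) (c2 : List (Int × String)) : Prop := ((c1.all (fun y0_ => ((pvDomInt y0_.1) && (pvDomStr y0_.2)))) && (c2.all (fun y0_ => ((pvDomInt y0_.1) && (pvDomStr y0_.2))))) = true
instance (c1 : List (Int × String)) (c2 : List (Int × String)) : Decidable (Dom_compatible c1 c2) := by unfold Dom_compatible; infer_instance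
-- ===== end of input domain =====

-- B drops A's reverse letter→pos map and its inline reverse-conflict check: it builds only the
-- merged pos→letter dict and checks injectivity once at the end (simpler decomposition).

-- ===== PORT A =====
-- the double loop 'for c in [c1, c2]: for pos, letter in c.items()' is one pass over c1 ++ c2;
-- 'pos in d and d[pos] != letter' is contains && get? ≠ some letter (the [] lookup is guarded by 'in', so get? is exact)
def compatibleGo : List (Int × String) → PySem.Dict Int String → PySem.Dict String Int → Bool
  | [], _, _ => true
  | (pos, letter) :: rest, p2l, l2p =>
    if p2l.contains pos && !(p2l.get? pos == some letter) then false
    else if l2p.contains letter && !(l2p.get? letter == some pos) then false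
    else compatibleGo rest (p2l.insert pos letter) (l2p.insert letter pos)

def compatible (c1 : List (Int × String)) (c2 : List (Int × String)) : Bool :=
  compatibleGo (c1 ++ c2) PySem.Dict.empty PySem.Dict.empty

-- ===== PORT B =====
-- 'merged.get(pos, letter) != letter' → getD; the early 'return False' is the none case
def mergeGo : List (Int × String) → PySem.Dict Int String → Option (PySem.Dict Int String)
  | [], m => some m
  | (pos, letter) :: rest, m =>
    if !(m.getD pos letter == letter) then none
    else mergeGo rest (m.insert pos letter)

-- 'len(set(merged.values())) == len(merged)'
def compatible_alt (c1 : List (Int × String)) (c2 : List (Int × String)) : Bool :=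
  match mergeGo (c1 ++ c2) PySem.Dict.empty with
  | none => false
  | some m => PySem.Set.len (PySem.Set.ofList m.values) == (m.size : Int)

-- ===== PRECONDITION & SPEC =====
def Spec_compatible (c1 : List (Int × String)) (c2 : List (Int × String)) (out : Bool) : Prop := out = compatible_alt c1 c2
instance (c1 : List (Int × String)) (c2 : List (Int × String)) (out : Bool) : Decidable (Spec_compatible c1 c2 out) := by unfold Spec_compatible; infer_instance

-- ===== CLAIM (what is proved, stated in full; the proofs are below) =====
def Claim_equal_compatible : Prop := ∀ (c1 : List (Int × String)) (c2 : List (Int × String)), Dom_compatible c1 c2 → Spec_compatible c1 c2 (compatible c1 c2)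

-- ===== LEMMAS AND PROOFS =====

-- len(set(l)) = len(l) exactly on duplicate-free lists
lemma len_ofList_eq_iff (l : List String) : ((PySem.Set.ofList l).length = l.length) ↔ l.Nodup := by
  induction l using List.reverseRecOn with
  | nil => simp [PySem.Set.ofList_nil]
  | append_singleton xs x ih =>
    rw [PySem.Set.ofList_append_singleton, PySem.Set.add_eq_ite]
    have hle := PySem.Set.length_ofList_le xs
    by_cases hx : x ∈ PySem.Set.ofList xs
    · have hxm : x ∈ xs := (PySem.Set.mem_ofList xs x).mp hx
      rw [if_pos hx]
      simp only [List.length_append, List.length_cons, List.length_nil]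
      constructor
      · intro h; omega
      · intro h
        exact absurd rfl ((List.nodup_append.mp h).2.2 x hxm x (List.mem_singleton_self x))
    · have hxm : x ∉ xs := fun h => hx ((PySem.Set.mem_ofList xs x).mpr h)
      rw [if_neg hx]
      simp only [List.length_append, List.length_cons, List.length_nil, List.nodup_append,
        List.nodup_singleton, true_and]
      constructor
      · intro h
        refine ⟨ih.mp (by omega), ?_⟩
        intro a ha b hb hab
        exact hxm ((List.mem_singleton.mp hb) ▸ hab ▸ ha)
      · rintro ⟨h1, _⟩
        have := ih.mpr h1
        omega

-- inserting a fresh key appends its value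
lemma values_insert_new (m : PySem.Dict Int String) (k : Int) (v : String)
    (h : m.get? k = none) : (m.insert k v).values = m.values ++ [v] := by
  have hc : m.contains k = false := by
    rw [PySem.Dict.contains_eq_isSome_get?, h]; rfl
  simp [PySem.Dict.values, PySem.Dict.items_insert_of_not_contains m v hc]

-- re-inserting an existing binding leaves the values unchanged
lemma values_insert_same (m : PySem.Dict Int String) (k : Int) (v : String)
    (h : m.get? k = some v) (hn : m.keys.Nodup) : (m.insert k v).values = m.values := by
  have hc : m.contains k = true := by
    rw [PySem.Dict.contains_eq_isSome_get?, h]; rfl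
  rw [PySem.Dict.values, PySem.Dict.items_insert_of_contains m v hc]
  rw [show List.map (fun p => if (p.1 == k) = true then (k, v) else p) m.items = m.items from ?_]
  · rfl
  · apply List.map_congr_left ?_ |>.trans (List.map_id m.items)
    intro p hp
    by_cases hpk : (p.1 == k) = true
    · have hk1 : p.1 = k := by simpa using hpk
      have hv2 : m.get? p.1 = some p.2 := PySem.Dict.get?_of_mem_items m (by simpa using hp) hn
      rw [hk1, h] at hv2
      simp only [if_pos hpk]
      exact Prod.ext_iff.mpr ⟨hk1.symm, Option.some_inj.mp hv2⟩
    · simp [hpk]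

-- a value's multiplicity in merged never decreases along B's loop
lemma mergeGo_count (s : List (Int × String)) : ∀ (m m' : PySem.Dict Int String),
    m.keys.Nodup → mergeGo s m = some m' → ∀ v, m.values.count v ≤ m'.values.count v := by
  induction s with
  | nil => intro m m' _ h v; cases h; exact le_refl _
  | cons hd tl ih =>
    obtain ⟨pos, letter⟩ := hd
    intro m m' hk h v
    rw [mergeGo] at h
    by_cases hC : (!(m.getD pos letter == letter)) = true
    · rw [if_pos hC] at h; cases h
    · rw [if_neg hC] at h
      have hkn : (m.insert pos letter).keys.Nodup := PySem.Dict.nodup_keys_insert m pos letter hk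
      have hget : m.getD pos letter = letter := by
        have : (m.getD pos letter == letter) = true := by
          cases hb : (m.getD pos letter == letter) <;> simp [hb] at hC ⊢
        simpa using this
      refine le_trans ?_ (ih (m.insert pos letter) m' hkn h v)
      cases hg : m.get? pos with
      | none => rw [values_insert_new m pos letter hg]; simp [List.count_append]
      | some l' =>
        have hl' : l' = letter := by
          rw [PySem.Dict.getD_eq_get?_getD, hg] at hget; simpa using hget
        rw [values_insert_same m pos letter (hl' ▸ hg) hk]

-- the main simulation: A's loop equals B's loop + final injectivity test, under the
-- invariant that l2p is the inverse of the injective m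
lemma go_eq (s : List (Int × String)) : ∀ (m : PySem.Dict Int String) (l2p : PySem.Dict String Int),
    m.keys.Nodup → m.values.Nodup →
    (∀ l p, l2p.get? l = some p ↔ m.get? p = some l) →
    compatibleGo s m l2p =
      (match mergeGo s m with
       | none => false
       | some m' => ((PySem.Set.len (PySem.Set.ofList m'.values) == (m'.size : Int) : Bool))) := by
  induction s with
  | nil =>
    intro m l2p hk hv hinv
    rw [compatibleGo, mergeGo]
    have h1 : PySem.Set.ofList m.values = m.values := PySem.Set.ofList_eq_self_of_nodup m.values hv
    have h2 : m.values.length = m.size := by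
      rw [PySem.Dict.values, PySem.Dict.size, List.length_map]
    simp only [PySem.Set.len, h1, h2, beq_self_eq_true]
  | cons hd tl ih =>
    obtain ⟨pos, letter⟩ := hd
    intro m l2p hk hv hinv
    rw [compatibleGo, mergeGo]
    have hc1 : (m.contains pos && !(m.get? pos == some letter)) = (!(m.getD pos letter == letter)) := by
      rw [PySem.Dict.contains_eq_isSome_get?, PySem.Dict.getD_eq_get?_getD]
      cases hg : m.get? pos <;> simp
    rw [hc1]
    by_cases hC : (!(m.getD pos letter == letter)) = true
    · rw [if_pos hC, if_pos hC]
    · rw [if_neg hC, if_neg hC]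
      have hget : m.getD pos letter = letter := by
        have : (m.getD pos letter == letter) = true := by
          cases hb : (m.getD pos letter == letter) <;> simp [hb] at hC ⊢
        simpa using this
      have hpos : m.get? pos = none ∨ m.get? pos = some letter := by
        cases hg : m.get? pos with
        | none => exact Or.inl rfl
        | some l' =>
          rw [PySem.Dict.getD_eq_get?_getD, hg] at hget
          exact Or.inr (by simpa using congrArg some hget)
      have hkn : (m.insert pos letter).keys.Nodup := PySem.Dict.nodup_keys_insert m pos letter hk
      by_cases hc2 : (l2p.contains letter && !(l2p.get? letter == some pos)) = true
      · rw [if_pos hc2]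
        -- A fails on the reverse map: letter already sits at another position p',
        -- so merged gains a duplicate value and B's final injectivity test fails
        obtain ⟨p', hp', hne⟩ : ∃ p', l2p.get? letter = some p' ∧ p' ≠ pos := by
          rcases Bool.and_eq_true_iff.mp hc2 with ⟨ha, hb⟩
          rw [PySem.Dict.contains_eq_isSome_get?] at ha
          cases hg : l2p.get? letter with
          | none => rw [hg] at ha; simp at ha
          | some q =>
            refine ⟨q, rfl, ?_⟩
            rw [hg] at hb
            intro hqe; rw [hqe] at hb; simp at hb
        have hmp' : m.get? p' = some letter := (hinv letter p').mp hp'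
        have hnone : m.get? pos = none := by
          rcases hpos with h | h
          · exact h
          · exact absurd ((hinv letter pos).mpr h) (fun hh => hne (Option.some_inj.mp (hp' ▸ hh)))
        have hvals : (m.insert pos letter).values = m.values ++ [letter] :=
          values_insert_new m pos letter hnone
        have hmem : letter ∈ m.values := by
          have := PySem.Dict.mem_items_of_get?_eq_some m hmp'
          rw [PySem.Dict.values]
          exact List.mem_map.mpr ⟨(p', letter), this, rfl⟩
        have hcnt : 2 ≤ ((m.insert pos letter).values.count letter) := by
          rw [hvals, List.count_append]
          have h1 : 0 < m.values.count letter := List.count_pos_iff.mpr hmem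
          have h2 : ([letter] : List String).count letter = 1 := by simp
          omega
        cases hmg : mergeGo tl (m.insert pos letter) with
        | none => rfl
        | some m'' =>
          have hcnt'' : 2 ≤ m''.values.count letter :=
            le_trans hcnt (mergeGo_count tl (m.insert pos letter) m'' hkn hmg letter)
          have hnd : ¬ m''.values.Nodup := by
            intro hnd
            have := List.nodup_iff_count_le_one.mp hnd letter
            omega
          have hlen : (PySem.Set.ofList m''.values).length ≠ m''.values.length :=
            fun h => hnd ((len_ofList_eq_iff m''.values).mp h)
          have hsz : m''.size = m''.values.length := by
            rw [PySem.Dict.size, PySem.Dict.values, List.length_map]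
          symm
          simp only [PySem.Set.len, beq_eq_false_iff_ne]
          intro h
          apply hlen
          rw [hsz] at h
          exact_mod_cast h
      · rw [if_neg hc2]
        -- no conflict: both loops recurse; re-establish the invariant for the inserted dicts
        have hl2p : l2p.get? letter = none ∨ l2p.get? letter = some pos := by
          cases hg : l2p.get? letter with
          | none => exact Or.inl rfl
          | some q =>
            refine Or.inr ?_
            have ha : l2p.contains letter = true := by
              rw [PySem.Dict.contains_eq_isSome_get?, hg]; rfl
            have : (!(l2p.get? letter == some pos)) = false := by
              cases hb : (!(l2p.get? letter == some pos)) with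
              | false => rfl
              | true => exact absurd (Bool.and_eq_true_iff.mpr ⟨ha, hb⟩) hc2
            rw [hg] at this
            simpa using this
        -- new values are duplicate-free
        have hv' : (m.insert pos letter).values.Nodup := by
          rcases hpos with h | h
          · have hnotin : letter ∉ m.values := by
              intro hmem
              rw [PySem.Dict.values] at hmem
              obtain ⟨p, hpmem, hp2⟩ := List.mem_map.mp hmem
              have hgp : m.get? p.1 = some letter :=
                hp2 ▸ PySem.Dict.get?_of_mem_items m (by simpa using hpmem) hk
              have := (hinv letter p.1).mpr hgp
              rcases hl2p with hnone | hsome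
              · rw [hnone] at this; cases this
              · rw [hsome] at this
                have : p.1 = pos := (Option.some_inj.mp this).symm
                rw [this] at hgp; rw [h] at hgp; cases hgp
            rw [values_insert_new m pos letter h]
            simpa [List.nodup_append] using ⟨hv, fun a ha hae => hnotin (hae ▸ ha)⟩
          · rw [values_insert_same m pos letter h hk]; exact hv
        -- the reverse map stays the exact inverse
        have hinv' : ∀ l p, (l2p.insert letter pos).get? l = some p ↔ (m.insert pos letter).get? p = some l := by
          intro l p
          rw [PySem.Dict.get?_insert, PySem.Dict.get?_insert]
          by_cases hl : l = letter <;> by_cases hp : p = pos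
          · simp [hl, hp]
          · simp only [hl, hp, if_true]
            constructor
            · intro h; exact absurd (Option.some_inj.mp h).symm hp
            · intro h
              have := (hinv letter p).mpr (hl ▸ h)
              rcases hl2p with hnone | hsome
              · rw [hnone] at this; cases this
              · rw [hsome] at this; exact absurd (Option.some_inj.mp this).symm hp
          · simp only [if_neg hl, hp, if_true]
            constructor
            · intro h
              have := (hinv l pos).mp h
              rcases hpos with hn | hs
              · rw [hn] at this; cases this
              · rw [hs] at this
                exact absurd (Option.some_inj.mp this).symm hl
            · intro h; exact absurd (Option.some_inj.mp h) (fun hh => hl hh.symm)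
          · simp only [if_neg hl, if_neg hp]; exact hinv l p
        exact ih (m.insert pos letter) (l2p.insert letter pos) hkn hv' hinv'

-- ===== VERDICT (by name: the statement is the Claim_ definition above) =====
theorem compatible_spec : Claim_equal_compatible := by
  intro c1 c2 _
  unfold Spec_compatible compatible compatible_alt
  exact go_eq (c1 ++ c2) PySem.Dict.empty PySem.Dict.empty
    (by simp [PySem.Dict.empty, PySem.Dict.keys])
    (by simp [PySem.Dict.empty, PySem.Dict.values])
    (by intro l p; simp [PySem.Dict.get?_empty])
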